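-- pv_equiv track=rewrite | github.com/jonnycomes/look_and_say | look_and_say.py | _even_parents
-- ===== SOURCE A (Python) =====
-- def _even_parents(string):
--     new_string = ''
--     if len(string) % 2 == 0:
--         start = 0
--     else:
--         start = 1
--         new_string += string[0]
--     while start < len(string) - 1:
--         new_string += int(string[start]) * string[start+1]
--         start += 2
--     return [new_string]
-- ===== SOURCE B (Python) =====
-- def _even_parents(string):
--     start = len(string) % 2
--     counts = string[start::2]
--     chars = string[start + 1::2]
--     return [string[:start] + ''.join(int(c) * ch for c, ch in zip(counts, chars))]
-- ===== Notes on version B (the rewrite author's own statement) =====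
-- stated objective: idiomatic
-- what changed: Replaces the stepping-index while loop with string accumulator by two strided slices (counts, chars) consumed in one zip/join comprehension, with the odd-length prefix taken as string[:start].
import Mathlib
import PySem

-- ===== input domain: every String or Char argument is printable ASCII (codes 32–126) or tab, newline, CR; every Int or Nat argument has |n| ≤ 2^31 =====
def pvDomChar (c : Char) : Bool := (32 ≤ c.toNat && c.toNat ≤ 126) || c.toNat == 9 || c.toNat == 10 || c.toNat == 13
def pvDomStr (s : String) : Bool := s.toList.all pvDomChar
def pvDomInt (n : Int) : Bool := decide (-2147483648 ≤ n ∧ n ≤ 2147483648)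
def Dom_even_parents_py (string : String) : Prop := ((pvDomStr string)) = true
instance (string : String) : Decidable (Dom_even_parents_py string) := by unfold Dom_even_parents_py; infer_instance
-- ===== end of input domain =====

-- B replaces A's stepping-index while loop and string accumulator by two strided
-- slices consumed in one zip/join comprehension (objective: idiomatic).

-- ===== PORT A =====
-- the while loop 'while start < len(string) - 1: new_string += int(string[start]) * string[start+1]; start += 2';
-- int(...) may raise ValueError: the loop returns none there (those inputs are excluded by Pre_).
def epLoopA (cs : List Char) (start : Nat) (acc : List Char) : Option (List Char) :=
  if h : (start : Int) < (cs.length : Int) - 1 then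
    match PySem.Int.ofChars? [PySem.List.pyGetD cs (start : Int) ' '] with
    | none => none
    | some n =>
        epLoopA cs (start + 2) (acc ++ PySem.List.pyRepeat [PySem.List.pyGetD cs ((start : Int) + 1) ' '] n)
  else some acc
termination_by cs.length - start
decreasing_by omega


def even_parents_py (string : String) : List String :=
  let cs := string.toList
  let sn : Nat × List Char :=
    if cs.length % 2 = 0 then (0, ([] : List Char))
    else (1, [] ++ [PySem.List.pyGetD cs 0 ' '])
  match epLoopA cs sn.1 sn.2 with
  | some r => [String.ofList r]
  | none => []

def even_parents_py_alt (string : String) : List String :=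
  let cs := string.toList
  let start : Nat := cs.length % 2
  let counts := (PySem.List.slice? cs (some (start : Int)) none 2).getD []
  let chars := (PySem.List.slice? cs (some ((start : Int) + 1)) none 2).getD []
  match (counts.zip chars).mapM
      (fun p => (PySem.Int.ofChars? [p.1]).map (fun n => PySem.List.pyRepeat [p.2] n)) with
  | some parts => [String.ofList (PySem.List.slice cs none (some (start : Int)) ++ parts.flatten)]
  | none => []

-- ===== PRECONDITION & SPEC =====
-- Pre_ excludes exactly the inputs on which int(string[i]) raises ValueError (a count
-- position holds a character that is not an integer literal): both Pythons raise there.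
def Pre_even_parents_py (string : String) : Prop :=
  ∀ i < string.toList.length,
    i % 2 = string.toList.length % 2 → i + 1 < string.toList.length →
      (PySem.Int.ofChars? [string.toList.getD i ' ']).isSome = true
instance (string : String) : Decidable (Pre_even_parents_py string) := by
  unfold Pre_even_parents_py; infer_instance

def pvWitness_even_parents_py : String := "a3b12"

def Spec_even_parents_py (string : String) (out : List String) : Prop := out = even_parents_py_alt string
instance (string : String) (out : List String) : Decidable (Spec_even_parents_py string out) := by unfold Spec_even_parents_py; infer_instance

-- ===== CLAIM (what is proved, stated in full; the proofs are below) =====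
def Claim_equal_even_parents_py : Prop := ∀ (string : String), Dom_even_parents_py string → Pre_even_parents_py string → Spec_even_parents_py string (even_parents_py string)

-- ===== LEMMAS AND PROOFS =====
lemma pv_mapM_isSome {α β : Type} (f : α → Option β) (dfl : β) :
    ∀ l : List α, (∀ x ∈ l, (f x).isSome = true) →
      l.mapM f = some (l.map fun x => (f x).getD dfl) := by
  intro l
  induction l with
  | nil => intro _; rfl
  | cons x xs ih =>
    intro h
    have hx := h x (by simp)
    obtain ⟨b, hb⟩ := Option.isSome_iff_exists.mp hx
    rw [List.mapM_cons, hb, ih (fun y hy => h y (by simp [hy]))]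
    simp [hb]

lemma pv_slice2 (cs : List Char) (a : Nat) (ha : a ≤ cs.length) :
    PySem.List.slice? cs (some (a : Int)) none 2 =
      some ((List.range ((cs.length - a + 1) / 2)).map (fun k => cs.getD (a + 2 * k) ' ')) := by
  simp only [PySem.List.slice?, PySem.List.sliceIndices]
  norm_num
  have h1 : ¬ ((a : Int) < 0) := by omega
  have h2 : min (a : Int) (cs.length : Int) = a := by omega
  simp only [if_neg h1, h2]
  have hcnt : (if (a : Int) < (cs.length : Int) then (((cs.length : Int) - a + 2 - 1) / 2).toNat else 0)
      = (cs.length - a + 1) / 2 := by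
    by_cases h : (a : Int) < (cs.length : Int)
    · rw [if_pos h]
      have : ((cs.length : Int) - a + 2 - 1) = ((cs.length - a + 1 : Nat) : Int) := by omega
      rw [this]
      omega
    · rw [if_neg h]
      have : a = cs.length := by omega
      omega
  rw [hcnt]
  rw [List.filterMap_congr (g := fun k => some (cs[a + 2 * k]?.getD ' ')) ?_]
  · simp
  · intro x hx
    simp only [List.mem_range] at hx
    have hlt : a + 2 * x < cs.length := by omega
    have : ((a : Int) + 2 * (x : Int)).toNat = a + 2 * x := by omega
    rw [this]
    simp [List.getElem?_eq_getElem hlt]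

lemma pv_loopA_eq (cs : List Char) :
    ∀ (n i : Nat) (acc : List Char), cs.length = i + 2 * n →
      (∀ k < n, (PySem.Int.ofChars? [cs.getD (i + 2 * k) ' ']).isSome = true) →
      epLoopA cs i acc = some (acc ++ ((List.range n).map (fun k =>
        PySem.List.pyRepeat [cs.getD (i + 2 * k + 1) ' ']
          ((PySem.Int.ofChars? [cs.getD (i + 2 * k) ' ']).getD 0))).flatten) := by
  intro n
  induction n with
  | zero =>
    intro i acc hlen _
    rw [epLoopA]
    rw [dif_neg (by omega)]
    simp
  | succ n ih =>
    intro i acc hlen h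
    rw [epLoopA]
    rw [dif_pos (by omega)]
    have h0 := h 0 (by omega)
    simp only [Nat.mul_zero, Nat.add_zero] at h0
    obtain ⟨m, hm⟩ := Option.isSome_iff_exists.mp h0
    have hg : PySem.List.pyGetD cs (i : Int) ' ' = cs.getD i ' ' :=
      PySem.List.pyGetD_natCast ..
    have hg1 : PySem.List.pyGetD cs ((i : Int) + 1) ' ' = cs.getD (i + 1) ' ' := by
      rw [show ((i : Int) + 1) = ((i + 1 : Nat) : Int) by omega, PySem.List.pyGetD_natCast]
    rw [hg, hg1, hm]
    show epLoopA cs (i + 2) (acc ++ PySem.List.pyRepeat [cs.getD (i + 1) ' '] m) = _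
    rw [ih (i + 2) _ (by omega) (fun k hk => by
      have := h (k + 1) (by omega)
      have he : i + 2 + 2 * k = i + 2 * (k + 1) := by ring
      rw [he]
      exact this)]
    congr 1
    rw [List.range_succ_eq_map]
    simp only [List.map_cons, List.map_map, List.flatten_cons, List.append_assoc]
    congr 2
    · rw [show i + 2 * 0 = i from by ring, hm]
      rfl
    congr 1
    apply List.map_congr_left
    intro k _
    have e1 : i + 2 * (k + 1) = i + 2 + 2 * k := by ring
    simp [Function.comp, Nat.succ_eq_add_one, e1]


theorem pv_main (string : String) (hpre : Pre_even_parents_py string) :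
    even_parents_py string = even_parents_py_alt string := by
  unfold Pre_even_parents_py at hpre
  set cs := string.toList with hcs
  set L := cs.length with hL
  set s := L % 2 with hs
  set n := (L - s) / 2 with hn
  have hs2 : s < 2 := Nat.mod_lt _ (by omega)
  have hLn : L = s + 2 * n := by omega
  have hpre' : ∀ k < n, (PySem.Int.ofChars? [cs.getD (s + 2 * k) ' ']).isSome = true := by
    intro k hk
    exact hpre (s + 2 * k) (by omega) (by omega) (by omega)
  have hcounts : PySem.List.slice? cs (some (s : Int)) none 2 =
      some ((List.range n).map (fun k => cs.getD (s + 2 * k) ' ')) := by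
    rw [pv_slice2 cs s (by omega)]
    congr 3
    omega
  have hbody := pv_loopA_eq cs n
  -- A's value
  have hA : even_parents_py string =
      [String.ofList (cs.take s ++ ((List.range n).map (fun k =>
        PySem.List.pyRepeat [cs.getD (s + 2 * k + 1) ' ']
          ((PySem.Int.ofChars? [cs.getD (s + 2 * k) ' ']).getD 0))).flatten)] := by
    simp only [even_parents_py, ← hcs]
    rcases (by omega : s = 0 ∨ s = 1) with h0 | h1
    · rw [if_pos (show cs.length % 2 = 0 by omega)]
      have hb := hbody 0 [] (by omega) (by
        intro k hk
        have := hpre' k (by omega)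
        rw [h0] at this
        simpa using this)
      dsimp only
      rw [hb]
      rw [h0]
      simp
    · rw [if_neg (show ¬ cs.length % 2 = 0 by omega)]
      have hb := hbody 1 ([] ++ [PySem.List.pyGetD cs 0 ' ']) (by omega) (by
        intro k hk
        have := hpre' k (by omega)
        rw [h1] at this
        simpa using this)
      dsimp only
      rw [hb]
      rw [h1]
      have hne : cs ≠ [] := by
        intro hnil
        rw [hnil] at hL
        simp at hL
        omega
      obtain ⟨c, t, hct⟩ := List.exists_cons_of_ne_nil hne
      rw [hct]
      simp [PySem.List.pyGetD_zero]
  -- B's value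
  have hB : even_parents_py_alt string =
      [String.ofList (cs.take s ++ ((List.range n).map (fun k =>
        PySem.List.pyRepeat [cs.getD (s + 2 * k + 1) ' ']
          ((PySem.Int.ofChars? [cs.getD (s + 2 * k) ' ']).getD 0))).flatten)] := by
    simp only [even_parents_py_alt, ← hcs, ← hL, ← hs]
    rw [hcounts]
    rw [PySem.List.slice_to_natCast]
    by_cases hn0 : n = 0
    · rw [hn0]
      simp
    · have hchars : PySem.List.slice? cs (some ((s : Int) + 1)) none 2 =
          some ((List.range n).map (fun k => cs.getD (s + 1 + 2 * k) ' ')) := by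
        rw [show ((s : Int) + 1) = ((s + 1 : Nat) : Int) by omega,
          pv_slice2 cs (s + 1) (by omega)]
        congr 3
        omega
      rw [hchars]
      simp only [Option.getD_some]
      rw [List.zip_map']
      rw [pv_mapM_isSome _ ([] : List Char) _ (by
        intro x hx
        simp only [List.mem_map, List.mem_range] at hx
        obtain ⟨k, hk, hxk⟩ := hx
        subst hxk
        simpa [Option.isSome_map] using hpre' k hk)]
      dsimp only
      congr 3
      rw [List.map_map]
      congr 1
      apply List.map_congr_left
      intro k hk
      simp only [List.mem_range] at hk
      obtain ⟨m, hm⟩ := Option.isSome_iff_exists.mp (hpre' k hk)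
      have e1 : s + 1 + 2 * k = s + 2 * k + 1 := by ring
      simp only [Function.comp_apply]
      rw [e1, hm]
      simp
  rw [hA, hB]

-- ===== VERDICT (by name: the statement is the Claim_ definition above) =====
theorem even_parents_py_spec : Claim_equal_even_parents_py := by
  intro string _ hpre
  unfold Spec_even_parents_py
  exact pv_main string hpre
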